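-- pv_equiv track=rewrite | github.com/c0chenji/HM-Solution | HeatMap/Interface/views.py | genRect
-- ===== SOURCE A (Python) =====
-- def genRect(directions, origin,width,height):
--     # get all points into x , y list
--     x = [point[origin][0] for point in directions]
--     y = [point[origin][1] for point in directions]
--
--     # take max and min values of x, y to construct
--     # left-top, right-top, right-bottom, left-bottom coordinates
--     minX, maxX, minY, maxY = min(x), max(x), min(y), max(y)
--     minX = (minX-50, 0)[minX-50 < 0]
--     maxX = (maxX+50, 700)[maxX+50 > width]
--     minY = (minY-50, 0)[minY-50 < 0]
--     maxY = (maxY+50, 500)[maxY+50 > height]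
--
--     leftTop = (minX, minY)
--     rightTop = (maxX, minY)
--     rightBottom = (maxX, maxY)
--     leftBottom = (minX, maxY)
--     return [leftTop, rightTop, rightBottom, leftBottom]
-- ===== SOURCE B (Python) =====
-- def genRect(directions, origin, width, height):
--     it = iter(directions)
--     try:
--         first = next(it)
--     except StopIteration:
--         raise ValueError("min() arg is an empty sequence")
--     fp = first[origin]
--     minX = maxX = fp[0]
--     minY = maxY = fp[1]
--     for point in it:
--         p = point[origin]
--         px, py = p[0], p[1]
--         if px < minX:
--             minX = px
--         if px > maxX:
--             maxX = px
--         if py < minY: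
--             minY = py
--         if py > maxY:
--             maxY = py
--     minX = 0 if minX - 50 < 0 else minX - 50
--     maxX = 700 if maxX + 50 > width else maxX + 50
--     minY = 0 if minY - 50 < 0 else minY - 50
--     maxY = 500 if maxY + 50 > height else maxY + 50
--     return [(minX, minY), (maxX, minY), (maxX, maxY), (minX, maxY)]
-- ===== Notes on version B (the rewrite author's own statement) =====
-- stated objective: alternative
-- what changed: Replaces the two list comprehensions plus four separate min/max passes with one loop over the points that maintains running minX/maxX/minY/maxY seeded from the first point; clamping is unchanged.
import Mathlib
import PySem

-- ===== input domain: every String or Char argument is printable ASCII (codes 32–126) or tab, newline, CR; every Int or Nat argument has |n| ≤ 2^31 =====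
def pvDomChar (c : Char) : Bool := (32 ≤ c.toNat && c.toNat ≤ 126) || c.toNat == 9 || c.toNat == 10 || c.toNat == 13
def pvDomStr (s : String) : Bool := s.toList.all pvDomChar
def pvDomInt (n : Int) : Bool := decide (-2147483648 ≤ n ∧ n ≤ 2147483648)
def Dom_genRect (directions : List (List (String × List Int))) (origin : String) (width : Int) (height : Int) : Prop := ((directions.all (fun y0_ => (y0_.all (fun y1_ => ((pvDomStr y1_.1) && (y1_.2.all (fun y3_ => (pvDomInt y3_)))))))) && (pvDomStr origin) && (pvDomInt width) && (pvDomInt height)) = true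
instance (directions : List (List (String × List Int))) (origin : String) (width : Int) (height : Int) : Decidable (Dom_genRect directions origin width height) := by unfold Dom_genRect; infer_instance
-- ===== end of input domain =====

-- B replaces A's two comprehensions + four min/max passes with one running-extrema loop; same clamped corners.


-- shared data accessors: point[origin][0] / point[origin][1] (dict lookup = first match; total via getD, Pre_ guarantees success)
def pvVal (point : List (String × List Int)) (origin : String) : List Int :=
  (List.lookup origin point).getD []
def pvX (point : List (String × List Int)) (origin : String) : Int :=
  (PySem.List.pyGet? (pvVal point origin) 0).getD 0
def pvY (point : List (String × List Int)) (origin : String) : Int :=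
  (PySem.List.pyGet? (pvVal point origin) 1).getD 0

-- ===== PORT A =====
def genRect (directions : List (List (String × List Int))) (origin : String) (width : Int) (height : Int) : List (Int × Int) :=
  let x := directions.map (fun point => pvX point origin)
  let y := directions.map (fun point => pvY point origin)
  let minX := (PySem.List.min? x (fun v => v)).getD 0
  let maxX := (PySem.List.max? x (fun v => v)).getD 0
  let minY := (PySem.List.min? y (fun v => v)).getD 0
  let maxY := (PySem.List.max? y (fun v => v)).getD 0
  let minX := if minX - 50 < 0 then 0 else minX - 50
  let maxX := if maxX + 50 > width then 700 else maxX + 50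
  let minY := if minY - 50 < 0 then 0 else minY - 50
  let maxY := if maxY + 50 > height then 500 else maxY + 50
  [(minX, minY), (maxX, minY), (maxX, maxY), (minX, maxY)]

-- ===== PORT B =====
def genRectLoop (origin : String) (pts : List (List (String × List Int))) (mnx mxx mny mxy : Int) : Int × Int × Int × Int :=
  match pts with
  | [] => (mnx, mxx, mny, mxy)
  | point :: rest =>
    let px := pvX point origin
    let py := pvY point origin
    genRectLoop origin rest
      (if px < mnx then px else mnx) (if px > mxx then px else mxx)
      (if py < mny then py else mny) (if py > mxy then py else mxy)

def genRect_alt (directions : List (List (String × List Int))) (origin : String) (width : Int) (height : Int) : List (Int × Int) :=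
  match directions with
  | [] => []  -- Python B raises ValueError here (outside Pre_)
  | first :: rest =>
    let fx := pvX first origin
    let fy := pvY first origin
    let r := genRectLoop origin rest fx fx fy fy
    let minX := if r.1 - 50 < 0 then 0 else r.1 - 50
    let maxX := if r.2.1 + 50 > width then 700 else r.2.1 + 50
    let minY := if r.2.2.1 - 50 < 0 then 0 else r.2.2.1 - 50
    let maxY := if r.2.2.2 + 50 > height then 500 else r.2.2.2 + 50
    [(minX, minY), (maxX, minY), (maxX, maxY), (minX, maxY)]

-- ===== PRECONDITION & SPEC =====
-- A raises on empty `directions` (min of empty), on a point lacking key `origin` (KeyError),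
-- and on a coordinate list of length < 2 (IndexError); exactly those inputs are excluded.
def Pre_genRect (directions : List (List (String × List Int))) (origin : String) (width : Int) (height : Int) : Prop :=
  directions ≠ [] ∧ ∀ point ∈ directions, 2 ≤ ((List.lookup origin point).getD []).length
instance (directions : List (List (String × List Int))) (origin : String) (width : Int) (height : Int) : Decidable (Pre_genRect directions origin width height) := by unfold Pre_genRect; infer_instance

def pvWitness_genRect : (List (List (String × List Int))) × String × Int × Int :=
  ([[("o", [100, 200])], [("o", [300, 50])]], "o", 700, 500)

def Spec_genRect (directions : List (List (String × List Int))) (origin : String) (width : Int) (height : Int) (out : List (Int × Int)) : Prop := out = genRect_alt directions origin width height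
instance (directions : List (List (String × List Int))) (origin : String) (width : Int) (height : Int) (out : List (Int × Int)) : Decidable (Spec_genRect directions origin width height out) := by unfold Spec_genRect; infer_instance

-- ===== CLAIM (what is proved, stated in full; the proofs are below) =====
def Claim_equal_genRect : Prop := ∀ (directions : List (List (String × List Int))) (origin : String) (width : Int) (height : Int), Dom_genRect directions origin width height → Pre_genRect directions origin width height → Spec_genRect directions origin width height (genRect directions origin width height)

-- ===== LEMMAS AND PROOFS =====

lemma if_lt_eq_min (a b : Int) : (if b < a then b else a) = min a b := by
  rcases lt_or_ge b a with h | h <;> simp [min_def] <;> omega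

lemma if_gt_eq_max (a b : Int) : (if b > a then b else a) = max a b := by
  rcases lt_or_ge a b with h | h <;> simp [max_def] <;> omega

lemma genRectLoop_eq (origin : String) :
    ∀ (pts : List (List (String × List Int))) (a b c d : Int),
      genRectLoop origin pts a b c d =
        (pts.foldl (fun m p => min m (pvX p origin)) a,
         pts.foldl (fun m p => max m (pvX p origin)) b,
         pts.foldl (fun m p => min m (pvY p origin)) c,
         pts.foldl (fun m p => max m (pvY p origin)) d) := by
  intro pts
  induction pts with
  | nil => intro a b c d; simp [genRectLoop]
  | cons p rest ih =>
    intro a b c d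
    simp only [genRectLoop, List.foldl_cons]
    rw [ih]
    rw [if_lt_eq_min, if_gt_eq_max, if_lt_eq_min, if_gt_eq_max]

-- ===== VERDICT (by name: the statement is the Claim_ definition above) =====
theorem genRect_spec : Claim_equal_genRect := by
  intro directions origin width height _hdom hpre
  unfold Spec_genRect
  obtain ⟨hne, -⟩ := hpre
  match directions with
  | [] => exact absurd rfl hne
  | first :: rest =>
    unfold genRect genRect_alt
    simp only [List.map_cons, PySem.List.min?_id_cons, PySem.List.max?_id_cons,
      Option.getD_some, genRectLoop_eq, List.foldl_map]
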